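-- pv_equiv track=rewrite | github.com/YWMditto/LabeledPinyinDataset | models/utils.py | extract_real_word_index
-- ===== SOURCE A (Python) =====
-- def extract_real_word_index(seq_len, sub_used_pinyin_len):
--     """
--     real_word_index 标记的是在原始数据中的 index；
--
--     initials_index 和 other_index 标记的是 real_word_index 的 index；
--     """
--
--     real_word_index = []
--     initials_index = []
--     other_index = []
--
--     sample_start_index = 0
--     max_seq_len = max(seq_len)
--     for i in range(len(seq_len)):
--         begin_idx = i * max_seq_len
--         cur_sample_index_list = [w + begin_idx for w in range(1, seq_len[i] - 1)]
--
--         real_word_index.extend(cur_sample_index_list)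
--
--         start_index = sample_start_index
--         for syllable_len in sub_used_pinyin_len[i]:
--             syllable_len = int(syllable_len)
--             if syllable_len != -1:
--                 initials_index.append(start_index)
--                 if syllable_len > 1:
--                     other_index.extend(list(range(start_index+1, start_index+syllable_len)))
--
--                 start_index += syllable_len
--             else:
--                 break
--
--         sample_start_index += len(cur_sample_index_list)
--
--     return real_word_index, initials_index, other_index
-- ===== SOURCE B (Python) =====
-- def _kept(syls):
--     stop = next((j for j, s in enumerate(syls) if int(s) == -1), len(syls))
--     return [int(s) for s in syls[:stop]]
--
-- def _prefix(xs):
--     sums = [0]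
--     last = 0
--     for x in xs:
--         last += x
--         sums.append(last)
--     return sums
--
-- def extract_real_word_index(seq_len, sub_used_pinyin_len):
--     max_seq_len = max(seq_len)
--     bases = [i * max_seq_len for i in range(len(seq_len))]
--     real_word_index = [p for base, n in zip(bases, seq_len)
--                        for p in range(base + 1, base + n - 1)]
--     keptss = [_kept(syls) for syls in sub_used_pinyin_len[:len(seq_len)]]
--     offsets = _prefix([max(n - 2, 0) for n in seq_len])
--     segs = [(off + t, s)
--             for off, ks in zip(offsets, keptss)
--             for t, s in zip(_prefix(ks), ks)]
--     initials_index = [t for t, _ in segs]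
--     other_index = [p for t, s in segs for p in range(t + 1, t + s)]
--     return real_word_index, initials_index, other_index
-- ===== Notes on version B (the rewrite author's own statement) =====
-- stated objective: alternative
-- what changed: A's single fused loop with two running accumulators is replaced by a staged dataflow: truncate each syllable list at the first -1 by locating it, compute all start positions at once as prefix-sum tables, materialise a flat global (start,length) segment table, and derive initials_index and other_index as two independent columnar comprehensions over that table (the break, the s>1 guard and both running accumulators disappear).
import Mathlib
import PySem

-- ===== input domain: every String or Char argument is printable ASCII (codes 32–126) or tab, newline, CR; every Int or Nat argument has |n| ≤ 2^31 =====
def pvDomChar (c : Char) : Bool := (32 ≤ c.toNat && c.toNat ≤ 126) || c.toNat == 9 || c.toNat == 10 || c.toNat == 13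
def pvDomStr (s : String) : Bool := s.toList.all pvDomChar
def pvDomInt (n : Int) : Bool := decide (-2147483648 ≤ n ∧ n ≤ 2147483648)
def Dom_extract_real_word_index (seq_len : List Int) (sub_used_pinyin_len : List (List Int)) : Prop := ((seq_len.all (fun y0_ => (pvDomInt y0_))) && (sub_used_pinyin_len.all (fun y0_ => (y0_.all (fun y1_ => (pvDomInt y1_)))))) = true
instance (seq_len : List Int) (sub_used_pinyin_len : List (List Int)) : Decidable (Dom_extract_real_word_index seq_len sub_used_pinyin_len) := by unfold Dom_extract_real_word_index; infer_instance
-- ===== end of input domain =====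

-- B replaces A's fused accumulator loop by a staged dataflow: truncate each syllable list at the
-- first -1, compute all start positions via prefix-sum tables, build one flat (start,length)
-- segment table and read the two index lists off it columnarly (objective: alternative, same cost).

-- ===== PORT A =====
-- inner 'for syllable_len in sub_used_pinyin_len[i]' loop of A (break on -1)
def pvInnerA (start : Int) (syls : List Int) (ii oi : List Int) : List Int × List Int :=
  match syls with
  | [] => (ii, oi)
  | s :: rest =>
    if s ≠ -1 then
      pvInnerA (start + s) rest (ii ++ [start])
        (if s > 1 then oi ++ PySem.List.pyRange (start + 1) (start + s) 1 else oi)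
    else (ii, oi)

-- outer 'for i in range(len(seq_len))' loop of A, as structural recursion over the two lists
-- (i is the running index; subs.headD [] / subs.tail read sub_used_pinyin_len[i]; outside Pre_,
-- where Python raises IndexError, the missing element is read as [])
def pvLoopA (msl : Int) (i : Nat) (ssi : Int) (ns : List Int) (subs : List (List Int))
    (rwi ii oi : List Int) : List Int × List Int × List Int :=
  match ns with
  | [] => (rwi, ii, oi)
  | n :: rest =>
    let begin_idx := (i : Int) * msl
    let cur := (PySem.List.pyRange 1 (n - 1) 1).map (fun w => w + begin_idx)
    let p := pvInnerA ssi (subs.headD []) ii oi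
    pvLoopA msl (i + 1) (ssi + (cur.length : Int)) rest subs.tail (rwi ++ cur) p.1 p.2

def extract_real_word_index (seq_len : List Int) (sub_used_pinyin_len : List (List Int)) : List Int × List Int × List Int :=
  let max_seq_len := (PySem.List.max? seq_len (fun x => x)).getD 0
  pvLoopA max_seq_len 0 0 seq_len sub_used_pinyin_len [] [] []

-- ===== PORT B =====
-- _kept: locate the first -1 (List.findIdx returns the length when absent, like next(..., len)) and slice
def pvKept (syls : List Int) : List Int :=
  syls.take (syls.findIdx (fun s => s == -1))

-- _prefix: inclusive prefix sums with a leading 0 (the Python out[-1] is tracked as the pair's .2)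
def pvPrefix (xs : List Int) : List Int :=
  (xs.foldl (fun (st : List Int × Int) x => (st.1 ++ [st.2 + x], st.2 + x)) ([0], 0)).1

def extract_real_word_index_alt (seq_len : List Int) (sub_used_pinyin_len : List (List Int)) : List Int × List Int × List Int :=
  let max_seq_len := (PySem.List.max? seq_len (fun x => x)).getD 0
  let bases := (PySem.List.pyRange 0 seq_len.length 1).map (fun i => i * max_seq_len)
  let real_word_index := (bases.zip seq_len).flatMap
      (fun p => PySem.List.pyRange (p.1 + 1) (p.1 + p.2 - 1) 1)
  let keptss := (sub_used_pinyin_len.take seq_len.length).map pvKept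
  let offsets := pvPrefix (seq_len.map (fun n => max (n - 2) 0))
  let segs := (offsets.zip keptss).flatMap
      (fun p => ((pvPrefix p.2).zip p.2).map (fun q => (p.1 + q.1, q.2)))
  let initials_index := segs.map (fun q => q.1)
  let other_index := segs.flatMap (fun q => PySem.List.pyRange (q.1 + 1) (q.1 + q.2) 1)
  (real_word_index, initials_index, other_index)

-- ===== PRECONDITION & SPEC =====
-- Pre_ excludes exactly the inputs on which Python A raises: seq_len = [] (max() raises ValueError)
-- and sub_used_pinyin_len shorter than seq_len (IndexError at sub_used_pinyin_len[i]).
def Pre_extract_real_word_index (seq_len : List Int) (sub_used_pinyin_len : List (List Int)) : Prop :=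
  seq_len ≠ [] ∧ seq_len.length ≤ sub_used_pinyin_len.length
instance (seq_len : List Int) (sub_used_pinyin_len : List (List Int)) : Decidable (Pre_extract_real_word_index seq_len sub_used_pinyin_len) := by unfold Pre_extract_real_word_index; infer_instance

def pvWitness_extract_real_word_index : List Int × List (List Int) := ([3, 4], [[1, 2], [2, -1, 5]])

def Spec_extract_real_word_index (seq_len : List Int) (sub_used_pinyin_len : List (List Int)) (out : List Int × List Int × List Int) : Prop := out = extract_real_word_index_alt seq_len sub_used_pinyin_len
instance (seq_len : List Int) (sub_used_pinyin_len : List (List Int)) (out : List Int × List Int × List Int) : Decidable (Spec_extract_real_word_index seq_len sub_used_pinyin_len out) := by unfold Spec_extract_real_word_index; infer_instance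

-- ===== CLAIM (what is proved, stated in full; the proofs are below) =====
def Claim_equal_extract_real_word_index : Prop := ∀ (seq_len : List Int) (sub_used_pinyin_len : List (List Int)), Dom_extract_real_word_index seq_len sub_used_pinyin_len → Pre_extract_real_word_index seq_len sub_used_pinyin_len → Spec_extract_real_word_index seq_len sub_used_pinyin_len (extract_real_word_index seq_len sub_used_pinyin_len)

-- ===== LEMMAS AND PROOFS =====

-- recursive characterisation of pvPrefix with running total c
def pvPre (c : Int) : List Int → List Int
  | [] => [c]
  | x :: xs => c :: pvPre (c + x) xs

theorem pvPre_fold (xs : List Int) : ∀ (acc : List Int) (c : Int),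
    (xs.foldl (fun (st : List Int × Int) x => (st.1 ++ [st.2 + x], st.2 + x)) (acc ++ [c], c)).1
      = acc ++ pvPre c xs := by
  induction xs with
  | nil => intro acc c; simp [pvPre]
  | cons x rest ih =>
    intro acc c
    simpa [pvPre, List.append_assoc] using ih (acc ++ [c]) (c + x)

theorem pvPrefix_eq (xs : List Int) : pvPrefix xs = pvPre 0 xs := by
  simpa using pvPre_fold xs [] 0

-- the per-sample segment table shifted by the sample offset
def pvSegs (start : Int) (ks : List Int) : List (Int × Int) :=
  ((pvPre 0 ks).zip ks).map (fun q => (start + q.1, q.2))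

theorem pvPre_shift (ks : List Int) : ∀ (c : Int), pvPre c ks = (pvPre 0 ks).map (· + c) := by
  induction ks with
  | nil => intro c; simp [pvPre]
  | cons x xs ih =>
    intro c
    rw [show pvPre c (x :: xs) = c :: pvPre (c + x) xs from rfl,
        show pvPre 0 (x :: xs) = 0 :: pvPre (0 + x) xs from rfl,
        ih (c + x), ih (0 + x), List.map_cons, List.map_map]
    refine congr_arg₂ List.cons (by omega) (List.map_congr_left fun a _ => ?_)
    simp only [Function.comp_apply]
    omega

theorem pvSegs_cons (start s : Int) (ks : List Int) :
    pvSegs start (s :: ks) = (start, s) :: pvSegs (start + s) ks := by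
  unfold pvSegs
  rw [show pvPre 0 (s :: ks) = 0 :: pvPre (0 + s) ks from rfl, pvPre_shift ks (0 + s),
      List.zip_cons_cons, List.zip_map_left, List.map_cons, List.map_map]
  refine congr_arg₂ List.cons (by simp) (List.map_congr_left fun a _ => ?_)
  obtain ⟨a1, a2⟩ := a
  simp only [Function.comp_apply, Prod.map_apply, id_eq, Prod.mk.injEq, and_true]
  omega

-- A's inner loop equals the columnar reading of B's segment table for that sample
theorem pvInnerA_eq (syls : List Int) : ∀ (start : Int) (ii oi : List Int),
    pvInnerA start syls ii oi =
      (ii ++ (pvSegs start (pvKept syls)).map (fun q => q.1),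
       oi ++ (pvSegs start (pvKept syls)).flatMap
          (fun q => PySem.List.pyRange (q.1 + 1) (q.1 + q.2) 1)) := by
  induction syls with
  | nil => intro start ii oi; simp [pvInnerA, pvKept, pvSegs, pvPre]
  | cons s rest ih =>
    intro start ii oi
    by_cases hs : s = -1
    · simp [pvInnerA, pvKept, hs, List.findIdx_cons, pvSegs, pvPre]
    · have hk : pvKept (s :: rest) = s :: pvKept rest := by
        have hs' : (s == -1) = false := by simpa using hs
        unfold pvKept
        rw [List.findIdx_cons, hs']
        simp [List.take_succ_cons]
      have hoi : (if s > 1 then oi ++ PySem.List.pyRange (start + 1) (start + s) 1 else oi)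
          = oi ++ PySem.List.pyRange (start + 1) (start + s) 1 := by
        by_cases h1 : s > 1
        · simp [h1]
        · rw [PySem.List.pyRange_one_eq_nil (by omega)]
          simp [h1]
      simp only [pvInnerA, hs, ne_eq, not_false_iff, if_true]
      rw [hoi, ih, hk, pvSegs_cons]
      simp [List.append_assoc]

-- a shifted unit range: range(base+1, base+n-1) lists base + w for w in range(1, n-1)
theorem pvRange_shift (base n : Int) :
    (PySem.List.pyRange 1 (n - 1) 1).map (fun w => w + base)
      = PySem.List.pyRange (base + 1) (base + n - 1) 1 := by
  rw [PySem.List.pyRange_one, PySem.List.pyRange_one, List.map_map]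
  rw [show (base + n - 1) - (base + 1) = n - 1 - 1 by ring]
  exact List.map_congr_left (fun k _ => by simp only [Function.comp_apply]; ring)

-- the main invariant: A's fused loop equals B's staged computation
theorem pvLoopA_eq (msl : Int) (ns : List Int) : ∀ (subs : List (List Int)) (i : Nat)
    (ssi : Int) (rwi ii oi : List Int),
    pvLoopA msl i ssi ns subs rwi ii oi =
      (rwi ++ ((((PySem.List.pyRange (i : Int) ((i : Int) + ns.length) 1).map
              (fun j => j * msl)).zip ns).flatMap
          (fun p => PySem.List.pyRange (p.1 + 1) (p.1 + p.2 - 1) 1)),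
       ii ++ (((pvPre ssi (ns.map (fun n => max (n - 2) 0))).zip
                ((subs.take ns.length).map pvKept)).flatMap
              (fun p => pvSegs p.1 p.2)).map (fun q => q.1),
       oi ++ (((pvPre ssi (ns.map (fun n => max (n - 2) 0))).zip
                ((subs.take ns.length).map pvKept)).flatMap
              (fun p => pvSegs p.1 p.2)).flatMap
            (fun q => PySem.List.pyRange (q.1 + 1) (q.1 + q.2) 1)) := by
  induction ns with
  | nil =>
    intro subs i ssi rwi ii oi
    have h0 : PySem.List.pyRange (i : Int) ((i : Int) + (([] : List Int).length : Int)) 1 = [] :=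
      PySem.List.pyRange_one_eq_nil (by simp)
    simp only [List.length_nil, Nat.cast_zero] at h0
    simp [pvLoopA, h0]
  | cons n rest ih =>
    intro subs i ssi rwi ii oi
    have hcur : ((PySem.List.pyRange 1 (n - 1) 1).map (fun w => w + (i : Int) * msl))
        = PySem.List.pyRange ((i : Int) * msl + 1) ((i : Int) * msl + n - 1) 1 :=
      pvRange_shift ((i : Int) * msl) n
    have hlen : (((PySem.List.pyRange 1 (n - 1) 1).map (fun w => w + (i : Int) * msl)).length : Int)
        = max (n - 2) 0 := by
      rw [List.length_map, PySem.List.length_pyRange_one]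
      omega
    have hpeel : PySem.List.pyRange (i : Int) ((i : Int) + ((rest.length : Int) + 1)) 1
        = (i : Int) :: PySem.List.pyRange ((i : Int) + 1) (((i : Int) + 1) + (rest.length : Int)) 1 := by
      rw [PySem.List.pyRange_one_cons (by omega)]
      congr 1
      ring
    cases subs with
    | nil =>
      simp only [pvLoopA, List.headD_nil, List.tail_nil]
      rw [show pvInnerA ssi [] ii oi = (ii, oi) from rfl]
      rw [ih [] (i + 1) _ _ _ _]
      simp only [List.take_nil, List.map_nil, List.zip_nil_right, List.flatMap_nil,
        List.length_cons]
      push_cast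
      rw [hpeel]
      simp only [List.map_cons, List.zip_cons_cons, List.flatMap_cons]
      rw [← hcur]
      simp [List.append_assoc]
    | cons syls subs' =>
      simp only [pvLoopA, List.headD_cons, List.tail_cons]
      rw [pvInnerA_eq, ih subs' (i + 1) _ _ _ _]
      simp only [List.length_cons, List.take_succ_cons, List.map_cons, List.map,
        pvPre, List.zip_cons_cons, List.flatMap_cons]
      rw [hlen]
      push_cast
      rw [hpeel]
      simp only [List.map_cons, List.zip_cons_cons, List.flatMap_cons]
      rw [← hcur]
      simp [List.append_assoc]

-- ===== VERDICT (by name: the statement is the Claim_ definition above) =====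
theorem extract_real_word_index_spec : Claim_equal_extract_real_word_index := by
  intro seq_len sub_used_pinyin_len _ _
  unfold Spec_extract_real_word_index extract_real_word_index extract_real_word_index_alt
  rw [pvLoopA_eq]
  simp [pvPrefix_eq, pvSegs]
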